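-- pv_equiv track=rewrite | github.com/pypi-data/pypi-mirror-361 | packages/rowan-mcp/rowan_mcp-1.0.0-py3-none-any.whl/rowan_mcp/functions/spin_states.py | _calculate_molecular_charge
-- ===== SOURCE A (Python) =====
-- def _calculate_molecular_charge(smiles: str) -> int:
--     """Calculate the total molecular charge from SMILES string."""
--     total_charge = 0
--
--     # Count negative ions
--     if '[Cl-]' in smiles:
--         total_charge -= smiles.count('[Cl-]')
--     if '[F-]' in smiles:
--         total_charge -= smiles.count('[F-]')
--     if '[Br-]' in smiles:
--         total_charge -= smiles.count('[Br-]')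
--     if '[I-]' in smiles:
--         total_charge -= smiles.count('[I-]')
--
--     # Count positive metal ions - common oxidation states
--     positive_ions = {
--         '[Pd+2]': 2, '[Pd+4]': 4,
--         '[Mn+2]': 2, '[Mn+3]': 3, '[Mn+4]': 4, '[Mn+7]': 7,
--         '[Fe+2]': 2, '[Fe+3]': 3,
--         '[Co+2]': 2, '[Co+3]': 3,
--         '[Ni+2]': 2, '[Ni+3]': 3,
--         '[Cu+1]': 1, '[Cu+2]': 2,
--         '[Cr+2]': 2, '[Cr+3]': 3, '[Cr+6]': 6,
--         '[V+2]': 2, '[V+3]': 3, '[V+4]': 4, '[V+5]': 5,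
--         '[Ti+2]': 2, '[Ti+3]': 3, '[Ti+4]': 4,
--         '[Zn+2]': 2
--     }
--
--     for ion, charge in positive_ions.items():
--         if ion in smiles:
--             total_charge += charge * smiles.count(ion)
--
--     return total_charge
-- ===== SOURCE B (Python) =====
-- # Alternative implementation: a single left-to-right greedy scan over the SMILES
-- # string driven by one token->signed-charge table, instead of ~29 separate
-- # membership/substring-count passes.
--
-- _CHARGES = {
--     '[Cl-]': -1, '[F-]': -1, '[Br-]': -1, '[I-]': -1,
--     '[Pd+2]': 2, '[Pd+4]': 4,
--     '[Mn+2]': 2, '[Mn+3]': 3, '[Mn+4]': 4, '[Mn+7]': 7,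
--     '[Fe+2]': 2, '[Fe+3]': 3,
--     '[Co+2]': 2, '[Co+3]': 3,
--     '[Ni+2]': 2, '[Ni+3]': 3,
--     '[Cu+1]': 1, '[Cu+2]': 2,
--     '[Cr+2]': 2, '[Cr+3]': 3, '[Cr+6]': 6,
--     '[V+2]': 2, '[V+3]': 3, '[V+4]': 4, '[V+5]': 5,
--     '[Ti+2]': 2, '[Ti+3]': 3, '[Ti+4]': 4,
--     '[Zn+2]': 2,
-- }
--
-- def _calculate_molecular_charge(smiles: str) -> int:
--     total = 0
--     i = 0
--     n = len(smiles)
--     while i < n: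
--         for tok, q in _CHARGES.items():
--             if smiles.startswith(tok, i):
--                 total += q
--                 i += len(tok)
--                 break
--         else:
--             i += 1
--     return total
-- ===== Notes on version B (the rewrite author's own statement) =====
-- stated objective: alternative
-- what changed: Replaces A's ~29 independent membership/count passes over the SMILES string (one 'in' test plus one .count scan per ion token) by one token->signed-charge table and a single greedy left-to-right scan that credits and skips the first matching token at each position; same exact result, traded for a single pass at Python (not C) speed.
import Mathlib
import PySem

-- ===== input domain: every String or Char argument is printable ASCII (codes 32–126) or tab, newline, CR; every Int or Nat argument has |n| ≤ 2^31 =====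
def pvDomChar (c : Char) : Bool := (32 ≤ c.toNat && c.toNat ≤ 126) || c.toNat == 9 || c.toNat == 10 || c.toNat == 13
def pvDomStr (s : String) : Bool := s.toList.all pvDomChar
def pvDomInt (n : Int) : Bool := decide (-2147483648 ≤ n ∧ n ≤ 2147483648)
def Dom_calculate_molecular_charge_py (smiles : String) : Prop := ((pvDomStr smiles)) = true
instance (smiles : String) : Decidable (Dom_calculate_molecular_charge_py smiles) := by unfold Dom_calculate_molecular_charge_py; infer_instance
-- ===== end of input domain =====

-- ===== PORT A =====
-- Port of A: four halide membership/count passes, then a pass per positive ion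
-- (the Python dict literal is ported as an association list, iterated in insertion order).
def calculate_molecular_charge_py (smiles : String) : Int :=
  let total : Int := 0
  let total := if PySem.Str.isIn "[Cl-]" smiles then total - (PySem.Str.count smiles "[Cl-]" : Int) else total
  let total := if PySem.Str.isIn "[F-]" smiles then total - (PySem.Str.count smiles "[F-]" : Int) else total
  let total := if PySem.Str.isIn "[Br-]" smiles then total - (PySem.Str.count smiles "[Br-]" : Int) else total
  let total := if PySem.Str.isIn "[I-]" smiles then total - (PySem.Str.count smiles "[I-]" : Int) else total
  let positive_ions : List (String × Int) :=
    [("[Pd+2]", 2),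
     ("[Pd+4]", 4),
     ("[Mn+2]", 2),
     ("[Mn+3]", 3),
     ("[Mn+4]", 4),
     ("[Mn+7]", 7),
     ("[Fe+2]", 2),
     ("[Fe+3]", 3),
     ("[Co+2]", 2),
     ("[Co+3]", 3),
     ("[Ni+2]", 2),
     ("[Ni+3]", 3),
     ("[Cu+1]", 1),
     ("[Cu+2]", 2),
     ("[Cr+2]", 2),
     ("[Cr+3]", 3),
     ("[Cr+6]", 6),
     ("[V+2]", 2),
     ("[V+3]", 3),
     ("[V+4]", 4),
     ("[V+5]", 5),
     ("[Ti+2]", 2),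
     ("[Ti+3]", 3),
     ("[Ti+4]", 4),
     ("[Zn+2]", 2)]
  positive_ions.foldl (fun total ic =>
    if PySem.Str.isIn ic.1 smiles then total + ic.2 * (PySem.Str.count smiles ic.1 : Int) else total) total

-- ===== PORT B =====
-- B: one token → signed-charge table (same insertion order as Source B's _CHARGES dict).
def pvCharges : List (List Char × Int) :=
  [(['[', 'C', 'l', '-', ']'], -1),
   (['[', 'F', '-', ']'], -1),
   (['[', 'B', 'r', '-', ']'], -1),
   (['[', 'I', '-', ']'], -1),
   (['[', 'P', 'd', '+', '2', ']'], 2),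
   (['[', 'P', 'd', '+', '4', ']'], 4),
   (['[', 'M', 'n', '+', '2', ']'], 2),
   (['[', 'M', 'n', '+', '3', ']'], 3),
   (['[', 'M', 'n', '+', '4', ']'], 4),
   (['[', 'M', 'n', '+', '7', ']'], 7),
   (['[', 'F', 'e', '+', '2', ']'], 2),
   (['[', 'F', 'e', '+', '3', ']'], 3),
   (['[', 'C', 'o', '+', '2', ']'], 2),
   (['[', 'C', 'o', '+', '3', ']'], 3),
   (['[', 'N', 'i', '+', '2', ']'], 2),
   (['[', 'N', 'i', '+', '3', ']'], 3),
   (['[', 'C', 'u', '+', '1', ']'], 1),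
   (['[', 'C', 'u', '+', '2', ']'], 2),
   (['[', 'C', 'r', '+', '2', ']'], 2),
   (['[', 'C', 'r', '+', '3', ']'], 3),
   (['[', 'C', 'r', '+', '6', ']'], 6),
   (['[', 'V', '+', '2', ']'], 2),
   (['[', 'V', '+', '3', ']'], 3),
   (['[', 'V', '+', '4', ']'], 4),
   (['[', 'V', '+', '5', ']'], 5),
   (['[', 'T', 'i', '+', '2', ']'], 2),
   (['[', 'T', 'i', '+', '3', ']'], 3),
   (['[', 'T', 'i', '+', '4', ']'], 4),
   (['[', 'Z', 'n', '+', '2', ']'], 2)]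

-- B: single greedy left-to-right scan; at each position the first matching token is
-- credited and skipped (i += len(tok), i.e. drop (len tok - 1) of the tail; every token
-- is nonempty), otherwise the scan advances one character.
def pvScan (s : List Char) : Int :=
  match s with
  | [] => 0
  | c :: rest =>
    match pvCharges.find? (fun tq => PySem.Chars.startswith (c :: rest) tq.1) with
    | some tq => tq.2 + pvScan (rest.drop (tq.1.length - 1))
    | none => pvScan rest
termination_by s.length
decreasing_by all_goals (simp [List.length_drop]; try omega)

def calculate_molecular_charge_py_alt (smiles : String) : Int :=
  pvScan smiles.toList

-- ===== PRECONDITION & SPEC =====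
def Spec_calculate_molecular_charge_py (smiles : String) (out : Int) : Prop := out = calculate_molecular_charge_py_alt smiles
instance (smiles : String) (out : Int) : Decidable (Spec_calculate_molecular_charge_py smiles out) := by unfold Spec_calculate_molecular_charge_py; infer_instance

-- ===== CLAIM (what is proved, stated in full; the proofs are below) =====
def Claim_equal_calculate_molecular_charge_py : Prop := ∀ (smiles : String), Dom_calculate_molecular_charge_py smiles → Spec_calculate_molecular_charge_py smiles (calculate_molecular_charge_py smiles)

-- ===== LEMMAS AND PROOFS =====

-- facts about the token table, checked by computation (Bool forms evaluate cheaply)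
lemma pvHead_b : pvCharges.all (fun tq => tq.1.head? == some '[') = true := by rfl

lemma pvTail_b : pvCharges.all (fun tq => tq.1.tail.all (fun ch => ch != '[')) = true := by rfl

lemma pvNoPrefix_b :
    pvCharges.all (fun tq => pvCharges.all (fun tq' => !(tq.1.isPrefixOf tq'.1) || tq.1 == tq'.1)) = true := by rfl

lemma pvNodupKeys : (pvCharges.map Prod.fst).Nodup := by decide

lemma pvHead : ∀ tq ∈ pvCharges, tq.1.head? = some '[' := by
  have h := List.all_eq_true.mp pvHead_b
  intro tq htq
  simpa using h tq htq

lemma pvTailNoBracket : ∀ tq ∈ pvCharges, ∀ ch ∈ tq.1.tail, ch ≠ '[' := by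
  have h := List.all_eq_true.mp pvTail_b
  intro tq htq ch hch
  have := List.all_eq_true.mp (h tq htq) ch hch
  simpa using this

lemma pvNoPrefix : ∀ tq ∈ pvCharges, ∀ tq' ∈ pvCharges, tq.1.isPrefixOf tq'.1 = true → tq.1 = tq'.1 := by
  have h := List.all_eq_true.mp pvNoPrefix_b
  intro tq htq tq' htq' hp
  have := List.all_eq_true.mp (h tq htq) tq' htq'
  simp [hp] at this
  exact this

lemma pvNeNil : ∀ tq ∈ pvCharges, tq.1 ≠ [] := by
  intro tq h hnil
  have := pvHead tq h
  simp [hnil] at this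

-- accumulator of PySem.Chars.count.go is additive
lemma pvGo_acc (sub : List Char) : ∀ (fuel : Nat) (s : List Char) (acc : Nat),
    PySem.Chars.count.go sub fuel s acc = acc + PySem.Chars.count.go sub fuel s 0 := by
  intro fuel
  induction fuel with
  | zero => intro s acc; simp [PySem.Chars.count.go]
  | succ n ih =>
    intro s acc
    cases s with
    | nil => simp [PySem.Chars.count.go]
    | cons c rest =>
      simp only [PySem.Chars.count.go]
      split
      · rw [ih _ (acc + 1), ih _ (0 + 1)]
        omega
      · exact ih rest acc

lemma pvGo_fuel (sub : List Char) (hsub : sub ≠ []) :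
    ∀ (fuel fuel' : Nat) (s : List Char) (acc : Nat), s.length ≤ fuel → s.length ≤ fuel' →
      PySem.Chars.count.go sub fuel s acc = PySem.Chars.count.go sub fuel' s acc := by
  intro fuel
  induction fuel with
  | zero =>
    intro fuel' s acc h h'
    have hs : s = [] := List.eq_nil_of_length_eq_zero (by omega)
    subst hs
    cases fuel' <;> simp [PySem.Chars.count.go]
  | succ n ih =>
    intro fuel' s acc h h'
    cases s with
    | nil => cases fuel' <;> simp [PySem.Chars.count.go]
    | cons c rest =>
      cases fuel' with
      | zero => simp at h'
      | succ m =>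
        have hlen : sub.length ≥ 1 := by cases sub <;> simp_all
        simp only [PySem.Chars.count.go]
        split
        · apply ih
          · simp at h ⊢; omega
          · simp at h' ⊢; omega
        · apply ih
          · simp at h; omega
          · simp at h'; omega

lemma pvCount_cons (sub : List Char) (h : sub ≠ []) (c : Char) (rest : List Char) :
    PySem.Chars.count (c :: rest) sub =
      (if sub.isPrefixOf (c :: rest) then PySem.Chars.count ((c :: rest).drop sub.length) sub + 1
       else PySem.Chars.count rest sub) := by
  have hlen : sub.length ≥ 1 := by cases sub <;> simp_all
  have hie : sub.isEmpty = false := by cases sub <;> simp_all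
  simp only [PySem.Chars.count, hie, Bool.false_eq_true, if_false]
  simp only [List.length_cons, PySem.Chars.count.go]
  split
  · rw [pvGo_acc sub rest.length _ (0 + 1)]
    rw [pvGo_fuel sub h rest.length ((c :: rest).drop sub.length).length _ 0 (by simp; omega) le_rfl]
    omega
  · rfl

lemma pvCount_nil (sub : List Char) (h : sub ≠ []) : PySem.Chars.count [] sub = 0 := by
  have hie : sub.isEmpty = false := by cases sub <;> simp_all
  simp [PySem.Chars.count, hie, PySem.Chars.count.go]

-- unfolding equations of the greedy scan
lemma pvScan_nil : pvScan [] = 0 := by rw [pvScan]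

lemma pvScan_cons_none (c : Char) (rest : List Char)
    (h : pvCharges.find? (fun tq => PySem.Chars.startswith (c :: rest) tq.1) = none) :
    pvScan (c :: rest) = pvScan rest := by
  rw [pvScan, h]

lemma pvScan_cons_some (c : Char) (rest : List Char) (tq : List Char × Int)
    (h : pvCharges.find? (fun tq => PySem.Chars.startswith (c :: rest) tq.1) = some tq) :
    pvScan (c :: rest) = tq.2 + pvScan (rest.drop (tq.1.length - 1)) := by
  rw [pvScan, h]

lemma pvCount_eq_zero_of_not_infix (s sub : List Char) (hn : ¬ sub <:+: s) :
    PySem.Chars.count s sub = 0 := by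
  have hne : sub ≠ [] := by
    intro hnil; exact hn (hnil ▸ List.nil_infix)
  induction s with
  | nil => exact pvCount_nil sub hne
  | cons c rest ih =>
    rw [pvCount_cons sub hne]
    rw [if_neg]
    · exact ih (fun hi => hn (List.infix_cons hi))
    · intro hp
      exact hn (List.IsPrefix.isInfix (List.isPrefixOf_iff_prefix.mp hp))

-- skipping characters that cannot start a token occurrence
lemma pvCount_append_skip (sub : List Char) (hh : sub.head? = some '[') :
    ∀ (u r : List Char), (∀ ch ∈ u, ch ≠ '[') →
      PySem.Chars.count (u ++ r) sub = PySem.Chars.count r sub := by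
  intro u
  induction u with
  | nil => intro r _; rfl
  | cons c u' ih =>
    intro r hu
    have hne : sub ≠ [] := by intro hnil; simp [hnil] at hh
    obtain ⟨a, sub', rfl⟩ : ∃ a sub', sub = a :: sub' := by
      cases sub with
      | nil => simp at hh
      | cons a sub' => exact ⟨a, sub', rfl⟩
    have ha : a = '[' := by simpa using hh
    rw [List.cons_append, pvCount_cons _ hne]
    rw [if_neg]
    · exact ih r (fun ch hch => hu ch (List.mem_cons_of_mem _ hch))
    · intro hp
      have hc : c ≠ '[' := hu c List.mem_cons_self
      have := List.isPrefixOf_iff_prefix.mp hp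
      obtain ⟨t, ht⟩ := this
      simp at ht
      exact hc (ha ▸ ht.1.symm)

-- splitting a mapped sum at one distinguished element
lemma pvSum_split {T : Type} [DecidableEq T] (x : T) (cq : Int) :
    ∀ (l : List T) (f g : T → Int), (∀ y ∈ l, f y = g y + if y = x then cq else 0) →
      x ∈ l → l.Nodup → (l.map f).sum = (l.map g).sum + cq := by
  intro l
  induction l with
  | nil => intro f g _ hm _; simp at hm
  | cons y l' ih =>
    intro f g h hm hnd
    by_cases hyx : y = x
    · subst hyx
      have hnot : y ∉ l' := (List.nodup_cons.mp hnd).1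
      have hfy : f y = g y + cq := by simpa using h y List.mem_cons_self
      have hcongr : l'.map f = l'.map g := by
        apply List.map_congr_left
        intro z hz
        have hzx : z ≠ y := fun hzy => hnot (hzy ▸ hz)
        simpa [hzx] using h z (List.mem_cons_of_mem _ hz)
      simp only [List.map_cons, List.sum_cons, hcongr, hfy]
      ring
    · have hfy : f y = g y := by simpa [hyx] using h y List.mem_cons_self
      have hm' : x ∈ l' := by
        rcases List.mem_cons.mp hm with h1 | h1
        · exact absurd h1.symm hyx
        · exact h1
      have := ih f g (fun z hz => h z (List.mem_cons_of_mem _ hz)) hm' (List.nodup_cons.mp hnd).2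
      simp only [List.map_cons, List.sum_cons, hfy, this]
      ring

-- the greedy scan computes the charge-weighted sum of all token counts
lemma pvScan_eq_sum : ∀ (n : Nat) (s : List Char), s.length ≤ n →
    pvScan s = (pvCharges.map (fun tq => tq.2 * (PySem.Chars.count s tq.1 : Int))).sum := by
  intro n
  induction n with
  | zero =>
    intro s hs
    have : s = [] := by cases s <;> simp_all
    subst this
    rw [pvScan_nil]
    rw [List.map_congr_left (fun tq htq => by
      rw [pvCount_nil tq.1 (pvNeNil tq htq)]
      simp : ∀ tq ∈ pvCharges, tq.2 * (PySem.Chars.count [] tq.1 : Int) = 0)]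
    simp
  | succ n ih =>
    intro s hs
    cases s with
    | nil =>
      rw [pvScan_nil]
      rw [List.map_congr_left (fun tq htq => by
        rw [pvCount_nil tq.1 (pvNeNil tq htq)]
        simp : ∀ tq ∈ pvCharges, tq.2 * (PySem.Chars.count [] tq.1 : Int) = 0)]
      simp
    | cons c rest =>
      cases hfind : pvCharges.find? (fun tq => PySem.Chars.startswith (c :: rest) tq.1) with
      | none =>
        have hnone := List.find?_eq_none.mp hfind
        rw [pvScan_cons_none c rest hfind]
        rw [ih rest (by simpa using Nat.le_of_succ_le_succ hs)]
        apply congrArg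
        apply List.map_congr_left
        intro tq htq
        have hnp : ¬ tq.1.isPrefixOf (c :: rest) = true := by
          intro hp
          apply hnone tq htq
          rw [PySem.Chars.startswith_iff]
          exact List.isPrefixOf_iff_prefix.mp hp
        rw [pvCount_cons tq.1 (pvNeNil tq htq), if_neg hnp]
      | some tq0 =>
        have htq0 : tq0 ∈ pvCharges := List.mem_of_find?_eq_some hfind
        have hpref : tq0.1 <+: (c :: rest) := by
          have := List.find?_some hfind
          rwa [PySem.Chars.startswith_iff] at this
        obtain ⟨r, hr⟩ := hpref
        have hne0 : tq0.1 ≠ [] := pvNeNil tq0 htq0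
        have hlen1 : tq0.1.length ≥ 1 := by cases h : tq0.1 <;> simp_all
        have hdrop : (c :: rest).drop tq0.1.length = r := by
          rw [← hr]; exact List.drop_left
        obtain ⟨k, hk⟩ : ∃ k, tq0.1.length = k + 1 := ⟨tq0.1.length - 1, by omega⟩
        have hdrop' : rest.drop (tq0.1.length - 1) = r := by
          rw [show tq0.1.length - 1 = k by omega]
          rw [hk, List.drop_succ_cons] at hdrop
          exact hdrop
        have hrlen : r.length ≤ n := by
          have h1 := congrArg List.length hr
          simp at h1 hs
          omega
        rw [pvScan_cons_some c rest tq0 hfind]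
        rw [hdrop', ih r hrlen]
        -- pointwise decomposition of each count
        have hpoint : ∀ tq ∈ pvCharges,
            tq.2 * (PySem.Chars.count (c :: rest) tq.1 : Int) =
              tq.2 * (PySem.Chars.count r tq.1 : Int) + (if tq = tq0 then tq0.2 else 0) := by
          intro tq htq
          by_cases heq : tq = tq0
          · subst heq
            rw [pvCount_cons tq.1 hne0, if_pos (List.isPrefixOf_iff_prefix.mpr ⟨r, hr⟩), hdrop]
            simp
            ring
          · have hkey : tq.1 ≠ tq0.1 := by
              intro hk
              exact heq (List.inj_on_of_nodup_map pvNodupKeys htq htq0 hk)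
            have hnp : ¬ tq.1 <+: (c :: rest) := by
              intro hp
              rcases List.prefix_or_prefix_of_prefix hp ⟨r, hr⟩ with h1 | h1
              · exact hkey (pvNoPrefix tq htq tq0 htq0 (List.isPrefixOf_iff_prefix.mpr h1))
              · exact hkey (pvNoPrefix tq0 htq0 tq htq (List.isPrefixOf_iff_prefix.mpr h1)).symm
            obtain ⟨a, u, hu⟩ : ∃ a u, tq0.1 = a :: u := by
              cases h : tq0.1 with
              | nil => exact absurd h hne0
              | cons a u => exact ⟨a, u, rfl⟩
            have hcr : c :: rest = a :: (u ++ r) := by rw [← hr, hu]; simp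
            have hcount : PySem.Chars.count (c :: rest) tq.1 = PySem.Chars.count r tq.1 := by
              rw [hcr, pvCount_cons tq.1 (pvNeNil tq htq), if_neg (by
                rw [← hcr]
                intro hp
                exact hnp (List.isPrefixOf_iff_prefix.mp hp))]
              exact pvCount_append_skip tq.1 (pvHead tq htq) u r (by
                intro ch hch
                have := pvTailNoBracket tq0 htq0 ch
                rw [hu] at this
                exact this hch)
            rw [hcount]
            simp [heq]
        rw [pvSum_split tq0 tq0.2 pvCharges _ _ hpoint htq0 (pvNodupKeys.of_map)]
        ring

-- A's branch bodies, with the membership test absorbed into the count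
lemma pvBranch (cs sub : List Char) (q total : Int) :
    (if PySem.Chars.isIn sub cs then total + q * (PySem.Chars.count cs sub : Int) else total) =
      total + q * (PySem.Chars.count cs sub : Int) := by
  cases h : PySem.Chars.isIn sub cs with
  | true => simp
  | false =>
    rw [pvCount_eq_zero_of_not_infix cs sub ((PySem.Chars.isIn_eq_false_iff sub cs).mp h)]
    simp

lemma pvBranchSub (cs sub : List Char) (total : Int) :
    (if PySem.Chars.isIn sub cs then total - (PySem.Chars.count cs sub : Int) else total) =
      total + (-1) * (PySem.Chars.count cs sub : Int) := by
  rw [← pvBranch cs sub (-1) total]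
  split <;> ring

-- A equals the charge-weighted sum of the token counts
lemma pvA_eq (smiles : String) :
    calculate_molecular_charge_py smiles =
      (pvCharges.map (fun tq => tq.2 * (PySem.Chars.count smiles.toList tq.1 : Int))).sum := by
  simp only [calculate_molecular_charge_py, PySem.Str.isIn, PySem.Str.count_eq]
  rw [PySem.List.foldl_congr_mem _ _
        (fun total ic => total + ic.2 * (PySem.Chars.count smiles.toList ic.1.toList : Int)) _
        (fun acc ic _ => pvBranch smiles.toList ic.1.toList ic.2 acc)]
  rw [PySem.List.foldl_add]
  rw [pvBranchSub, pvBranchSub, pvBranchSub, pvBranchSub]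
  simp only [pvCharges, List.map_cons, List.map_nil, List.sum_cons, List.sum_nil]
  norm_num
  simp
  ring

-- ===== VERDICT (by name: the statement is the Claim_ definition above) =====
theorem calculate_molecular_charge_py_spec : Claim_equal_calculate_molecular_charge_py := by
  intro smiles _
  unfold Spec_calculate_molecular_charge_py calculate_molecular_charge_py_alt
  rw [pvA_eq, pvScan_eq_sum smiles.toList.length smiles.toList le_rfl]
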